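-- pv_equiv track=rewrite | github.com/Yuchong-W/EvoMaster_Skill | MasterSkill/runner/docker_executor.py | _normalize_container_path
-- ===== SOURCE A (Python) =====
-- def _normalize_container_path(path: str) -> str:
--     if not path:
--         return ""
--     normalized = path.replace("\\", "/")
--     if not normalized.startswith("/"):
--         normalized = "/" + normalized
--     while "//" in normalized:
--         normalized = normalized.replace("//", "/")
--     return normalized.rstrip("/") or "/"
-- ===== SOURCE B (Python) =====
-- def _normalize_container_path(path: str) -> str:
--     if not path:
--         return ""
--     parts = [p for p in path.replace("\\", "/").split("/") if p]
--     return "/" + "/".join(parts)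
-- ===== Notes on version B (the rewrite author's own statement) =====
-- stated objective: simpler
-- what changed: A repeatedly rewrites the whole string (conditional separator prepend, a while loop collapsing doubled separators pass by pass, then a right-strip with a root fallback); B tokenizes once: split on the separator, drop empty segments, and rejoin them behind a single leading separator.
import Mathlib
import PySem

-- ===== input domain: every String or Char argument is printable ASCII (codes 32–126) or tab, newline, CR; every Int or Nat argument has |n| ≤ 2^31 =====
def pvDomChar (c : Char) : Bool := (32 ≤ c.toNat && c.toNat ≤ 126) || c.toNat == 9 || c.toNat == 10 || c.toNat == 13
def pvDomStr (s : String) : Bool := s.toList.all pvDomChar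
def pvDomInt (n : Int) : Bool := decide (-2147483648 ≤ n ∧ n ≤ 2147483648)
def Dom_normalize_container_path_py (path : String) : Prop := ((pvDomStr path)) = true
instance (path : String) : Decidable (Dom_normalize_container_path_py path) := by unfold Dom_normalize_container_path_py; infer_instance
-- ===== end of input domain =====

-- B replaces A's repeated whole-string rewriting (conditional prepend, a while loop
-- collapsing doubled separators, right-strip with root fallback) by a single tokenize:
-- split on the separator, drop empty segments, rejoin with a leading one; objective: simpler.


-- ===== PORT A =====

-- One textual pass of s.replace("//", "/") written structurally: used only to prove that
-- A's while loop terminates (each pass strictly shortens a string containing "//").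
def pvSq1 : List Char → List Char
  | [] => []
  | [c] => [c]
  | c :: d :: t => if c = '/' ∧ d = '/' then '/' :: pvSq1 t else c :: pvSq1 (d :: t)
termination_by l => l.length

theorem pv_go_eq_sq1 (fuel : Nat) : ∀ (l acc : List Char), l.length ≤ fuel →
    PySem.Chars.replace.go ['/', '/'] ['/'] fuel l acc = acc.reverse ++ pvSq1 l := by
  induction fuel with
  | zero =>
    intro l acc h
    have hl : l = [] := by cases l <;> simp_all
    subst hl
    rw [PySem.Chars.replace.go.eq_def]
    simp [pvSq1]
  | succ n ih =>
    intro l acc h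
    match l with
    | [] => rw [PySem.Chars.replace.go.eq_def]; simp [pvSq1]
    | [c] =>
      rw [PySem.Chars.replace.go.eq_def]
      have hpre : List.isPrefixOf ['/', '/'] [c] = false := by
        simp [List.isPrefixOf]
      simp only [hpre]
      rw [PySem.Chars.replace.go.eq_def]
      cases n with
      | zero => rw [PySem.Chars.replace.go.eq_def]; simp [pvSq1]
      | succ m => rw [PySem.Chars.replace.go.eq_def]; simp [pvSq1]
    | c :: d :: t =>
      rw [PySem.Chars.replace.go.eq_def]
      simp only []
      by_cases hcd : c = '/' ∧ d = '/'
      · obtain ⟨hc, hd⟩ := hcd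
        subst hc; subst hd
        have hpre : List.isPrefixOf ['/', '/'] ('/' :: '/' :: t) = true := by
          simp [List.isPrefixOf]
        simp only [hpre, if_true, List.reverse_singleton, List.singleton_append]
        have ht : t.length ≤ n := by simp at h; omega
        rw [show List.drop ['/', '/'].length ('/' :: '/' :: t) = t from rfl]
        rw [ih t ('/' :: acc) ht]
        simp [pvSq1]
      · have hpre : List.isPrefixOf ['/', '/'] (c :: d :: t) = false := by
          simp [List.isPrefixOf]
          intro hc hd; exact hcd ⟨hc.symm, hd.symm⟩
        simp only [hpre, Bool.false_eq_true, if_false]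
        have ht : (d :: t).length ≤ n := by simp at h ⊢; omega
        rw [ih (d :: t) (c :: acc) ht]
        rw [pvSq1]
        simp [hcd]

theorem pv_replace_eq_sq1 (l : List Char) :
    PySem.Chars.replace l ['/', '/'] ['/'] = pvSq1 l := by
  unfold PySem.Chars.replace
  simpa using pv_go_eq_sq1 l.length l [] le_rfl

theorem pv_sq1_len_le (l : List Char) : (pvSq1 l).length ≤ l.length := by
  fun_induction pvSq1 l with
  | case1 => simp
  | case2 c => simp
  | case3 c d t h ih => simp; omega
  | case4 c d t h ih => simp at ih ⊢; omega

theorem pv_sq1_len_lt (l : List Char) (h : ['/', '/'] <:+: l) :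
    (pvSq1 l).length < l.length := by
  fun_induction pvSq1 l with
  | case1 =>
    exact absurd (List.IsInfix.length_le h) (by simp)
  | case2 c =>
    exact absurd (List.IsInfix.length_le h) (by simp)
  | case3 c d t hcd ih =>
    have hle := pv_sq1_len_le t
    simp; omega
  | case4 c d t hcd ih =>
    have h' : ['/', '/'] <:+: d :: t := by
      rcases List.infix_cons_iff.mp h with hp | hi
      · rcases hp with ⟨u, hu⟩
        simp at hu
        exact absurd ⟨hu.1.symm, hu.2.1.symm⟩ hcd
      · exact hi
    simp
    have := ih h'
    simp at this; omega

-- termination lemma for the 'while "//" in normalized' loop, cited by name below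
theorem pv_replace_lt (l : List Char) (h : PySem.Chars.isIn ['/', '/'] l = true) :
    (PySem.Chars.replace l ['/', '/'] ['/']).length < l.length := by
  rw [pv_replace_eq_sq1]
  exact pv_sq1_len_lt l ((PySem.Chars.isIn_iff_infix _ _).mp h)

-- while "//" in normalized: normalized = normalized.replace("//", "/")
def pvCollapseLoop (l : List Char) : List Char :=
  if h : PySem.Chars.isIn ['/', '/'] l = true then
    pvCollapseLoop (PySem.Chars.replace l ['/', '/'] ['/'])
  else l
termination_by l.length
decreasing_by exact pv_replace_lt l h

-- s.rstrip("/"): drop trailing '/' characters only (exact: right-strip, hand port)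
def pvRstripSlash (l : List Char) : List Char :=
  (l.reverse.dropWhile (fun c => c == '/')).reverse

def normalize_container_path_py (path : String) : String :=
  if path.toList = [] then "" else
    let n1 := PySem.Chars.replace path.toList ['\\'] ['/']
    let n2 := if PySem.Chars.startswith n1 ['/'] then n1 else '/' :: n1
    let n3 := pvCollapseLoop n2
    let r := pvRstripSlash n3
    String.mk (if r = [] then ['/'] else r)

-- ===== PORT B =====
def normalize_container_path_py_alt (path : String) : String :=
  if path.toList = [] then "" else
    let parts := (PySem.Chars.splitOn (PySem.Chars.replace path.toList ['\\'] ['/']) ['/']).filter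
      (fun p => decide (p ≠ []))
    String.mk ('/' :: PySem.Chars.join ['/'] parts)

-- ===== PRECONDITION & SPEC =====
def Spec_normalize_container_path_py (path : String) (out : String) : Prop := out = normalize_container_path_py_alt path
instance (path : String) (out : String) : Decidable (Spec_normalize_container_path_py path out) := by unfold Spec_normalize_container_path_py; infer_instance

-- ===== CLAIM (what is proved, stated in full; the proofs are below) =====
def Claim_equal_normalize_container_path_py : Prop := ∀ (path : String), Dom_normalize_container_path_py path → Spec_normalize_container_path_py path (normalize_container_path_py path)

-- ===== LEMMAS AND PROOFS =====

-- the fixed point of the while loop: all runs of '/' collapsed to a single '/'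
def pvSq : List Char → List Char
  | [] => []
  | [c] => [c]
  | c :: d :: t => if c = '/' ∧ d = '/' then pvSq (d :: t) else c :: pvSq (d :: t)
termination_by l => l.length

theorem pvSq_cons (c : Char) (t : List Char) :
    pvSq (c :: t) = if c = '/' ∧ t.head? = some '/' then pvSq t else c :: pvSq t := by
  match t with
  | [] => simp [pvSq]
  | d :: t' =>
    rw [pvSq]
    by_cases h : c = '/' ∧ d = '/' <;> simp_all

theorem pvSq1_head (l : List Char) : (pvSq1 l).head? = l.head? := by
  fun_induction pvSq1 l with
  | case1 => rfl
  | case2 c => rfl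
  | case3 c d t h => simp [h.1]
  | case4 c d t h ih => rfl

theorem pvSq_sq1 (l : List Char) : pvSq (pvSq1 l) = pvSq l := by
  fun_induction pvSq1 l with
  | case1 => rfl
  | case2 c => rfl
  | case3 c d t h ih =>
    obtain ⟨hc, hd⟩ := h; subst hc; subst hd
    rw [show pvSq ('/' :: '/' :: t) = pvSq ('/' :: t) by rw [pvSq]; simp]
    rw [pvSq_cons, pvSq_cons '/' t, pvSq1_head, ih]
  | case4 c d t h ih =>
    rw [pvSq_cons, pvSq_cons c (d :: t)]
    rw [pvSq1_head]
    simp only [List.head?_cons]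
    have : ¬(c = '/' ∧ some d = some '/') := by simpa using h
    rw [if_neg this, if_neg (by simpa using h), ih]

theorem pvSq_fixed (l : List Char) (h : ¬ ['/', '/'] <:+: l) : pvSq l = l := by
  fun_induction pvSq l with
  | case1 => rfl
  | case2 c => rfl
  | case3 c d t hcd ih =>
    exact absurd ⟨[], t, by simp [hcd.1, hcd.2]⟩ h
  | case4 c d t hcd ih =>
    rw [ih (fun hi => h (hi.trans (List.suffix_cons c (d :: t)).isInfix))]

theorem pvCollapseLoop_eq_sq (l : List Char) : pvCollapseLoop l = pvSq l := by
  rw [pvCollapseLoop]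
  split
  · next h =>
    rw [pv_replace_eq_sq1]
    have := pvCollapseLoop_eq_sq (pvSq1 l)
    rw [this, pvSq_sq1]
  · next h =>
    rw [pvSq_fixed]
    intro hi
    exact h ((PySem.Chars.isIn_iff_infix _ _).mpr hi)
termination_by l.length
decreasing_by exact pv_sq1_len_lt l ((PySem.Chars.isIn_iff_infix _ _).mp (by assumption))

-- structural form of s.split("/")
def pvSplit : List Char → List (List Char)
  | [] => [[]]
  | c :: t =>
    match pvSplit t with
    | [] => [[c]]  -- unreachable
    | h :: r => if c = '/' then [] :: h :: r else (c :: h) :: r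

theorem pvSplit_ne_nil (l : List Char) : pvSplit l ≠ [] := by
  match l with
  | [] => simp [pvSplit]
  | c :: t =>
    rw [pvSplit]
    cases h : pvSplit t with
    | nil => simp
    | cons h' r => by_cases hc : c = '/' <;> simp [hc]

theorem pv_splitgo_eq (fuel : Nat) : ∀ (l cur : List Char) (acc : List (List Char)), l.length ≤ fuel →
    PySem.Chars.splitOn.go ['/'] fuel l cur acc =
      acc.reverse ++ (pvSplit l).modifyHead (fun h => cur.reverse ++ h) := by
  induction fuel with
  | zero =>
    intro l cur acc h
    have hl : l = [] := by cases l <;> simp_all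
    subst hl
    rw [PySem.Chars.splitOn.go.eq_def]
    simp [pvSplit]
  | succ n ih =>
    intro l cur acc h
    match l with
    | [] =>
      rw [PySem.Chars.splitOn.go.eq_def]
      simp [pvSplit]
    | c :: t =>
      rw [PySem.Chars.splitOn.go.eq_def]
      simp only []
      by_cases hc : c = '/'
      · subst hc
        have hpre : List.isPrefixOf ['/'] ('/' :: t) = true := by simp [List.isPrefixOf]
        simp only [hpre, if_true]
        have ht : t.length ≤ n := by simp at h; omega
        rw [show List.drop ['/'].length ('/' :: t) = t from rfl]
        rw [ih t [] (cur.reverse :: acc) ht]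
        rw [pvSplit]
        obtain ⟨h', r, hr⟩ : ∃ h' r, pvSplit t = h' :: r := by
          cases hsp : pvSplit t with
          | nil => exact absurd hsp (pvSplit_ne_nil t)
          | cons a b => exact ⟨a, b, rfl⟩
        rw [hr]
        simp
      · have hpre : List.isPrefixOf ['/'] (c :: t) = false := by
          simp [List.isPrefixOf]; exact fun h => absurd h.symm hc
        simp only [hpre, Bool.false_eq_true, if_false]
        have ht : t.length ≤ n := by simp at h; omega
        rw [ih t (c :: cur) acc ht]
        rw [pvSplit]
        obtain ⟨h', r, hr⟩ : ∃ h' r, pvSplit t = h' :: r := by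
          cases hsp : pvSplit t with
          | nil => exact absurd hsp (pvSplit_ne_nil t)
          | cons a b => exact ⟨a, b, rfl⟩
        rw [hr]
        simp [hc]

theorem pv_splitOn_eq (l : List Char) : PySem.Chars.splitOn l ['/'] = pvSplit l := by
  obtain ⟨a, b, hab⟩ : ∃ a b, pvSplit l = a :: b := by
    cases hsp : pvSplit l with
    | nil => exact absurd hsp (pvSplit_ne_nil l)
    | cons a b => exact ⟨a, b, rfl⟩
  unfold PySem.Chars.splitOn
  rw [pv_splitgo_eq (l.length + 1) l [] [] (by omega), hab]
  simp

-- the nonempty segments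
def pvParts (l : List Char) : List (List Char) := (pvSplit l).filter (fun p => decide (p ≠ []))

theorem pvParts_slash (t : List Char) : pvParts ('/' :: t) = pvParts t := by
  unfold pvParts
  rw [pvSplit]
  obtain ⟨h', r, hr⟩ : ∃ h' r, pvSplit t = h' :: r := by
    cases hsp : pvSplit t with
    | nil => exact absurd hsp (pvSplit_ne_nil t)
    | cons a b => exact ⟨a, b, rfl⟩
  rw [hr]
  simp

theorem pv_split_sf (seg : List Char) (hs : ∀ c ∈ seg, c ≠ '/') : pvSplit seg = [seg] := by
  induction seg with
  | nil => rfl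
  | cons c t ih =>
    rw [pvSplit, ih (fun x hx => hs x (List.mem_cons_of_mem c hx))]
    simp [hs c (List.mem_cons_self)]

theorem pv_split_sf_append (seg r : List Char) (hs : ∀ c ∈ seg, c ≠ '/') :
    pvSplit (seg ++ '/' :: r) = seg :: pvSplit r := by
  induction seg with
  | nil =>
    simp only [List.nil_append]
    rw [pvSplit]
    obtain ⟨h', rr, hr⟩ : ∃ h' rr, pvSplit r = h' :: rr := by
      cases hsp : pvSplit r with
      | nil => exact absurd hsp (pvSplit_ne_nil r)
      | cons a b => exact ⟨a, b, rfl⟩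
    rw [hr]; simp
  | cons c t ih =>
    have ih' := ih (fun x hx => hs x (List.mem_cons_of_mem c hx))
    simp only [List.cons_append]
    rw [pvSplit, ih']
    simp [hs c (List.mem_cons_self)]

theorem pv_sq_sf_append (seg l : List Char) (hs : ∀ c ∈ seg, c ≠ '/') :
    pvSq (seg ++ l) = seg ++ pvSq l := by
  induction seg with
  | nil => simp
  | cons c t ih =>
    have hc := hs c (List.mem_cons_self)
    simp only [List.cons_append]
    rw [pvSq_cons, if_neg (by simp [hc]), ih (fun x hx => hs x (List.mem_cons_of_mem c hx))]

theorem pv_rstrip_append (a b : List Char) :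
    pvRstripSlash (a ++ b) = if pvRstripSlash b = [] then pvRstripSlash a else a ++ pvRstripSlash b := by
  unfold pvRstripSlash
  rw [List.reverse_append, List.dropWhile_append]
  by_cases hb : (b.reverse.dropWhile (fun c => c == '/')) = []
  · simp [hb]
  · simp [hb, List.isEmpty_iff]

theorem pv_rstrip_sf (seg : List Char) (hne : seg ≠ []) (hs : ∀ c ∈ seg, c ≠ '/') :
    pvRstripSlash ('/' :: seg) = '/' :: seg := by
  unfold pvRstripSlash
  obtain ⟨x, xs, hx⟩ : ∃ x xs, seg.reverse = x :: xs := by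
    cases h : seg.reverse with
    | nil => exact absurd (by simpa using h) hne
    | cons a b => exact ⟨a, b, rfl⟩
  have hxmem : x ∈ seg := by
    have : x ∈ seg.reverse := by rw [hx]; exact List.mem_cons_self
    simpa using this
  have hxp : (x == '/') = false := by simpa using hs x hxmem
  rw [show ('/' :: seg).reverse = x :: (xs ++ ['/']) by simp [hx]]
  rw [List.dropWhile_cons_of_neg (by simp [hxp])]
  conv_rhs => rw [← List.reverse_reverse seg, hx]
  simp

theorem pv_intercalate_cons2 (x y : List Char) (ys : List (List Char)) :
    List.intercalate ['/'] (x :: y :: ys) = x ++ '/' :: List.intercalate ['/'] (y :: ys) := by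
  simp [List.intercalate, List.intersperse]

-- the main invariant: rstrip-of-collapsed "/"++l is the joined nonempty segments of l
theorem pvK (l : List Char) :
    pvRstripSlash (pvSq ('/' :: l)) =
      if pvParts l = [] then [] else '/' :: PySem.Chars.join ['/'] (pvParts l) := by
  match l with
  | [] =>
    simp [pvSq, pvRstripSlash, pvParts, pvSplit, List.dropWhile]
  | '/' :: t =>
    rw [show pvSq ('/' :: '/' :: t) = pvSq ('/' :: t) by rw [pvSq]; simp]
    rw [pvK t, pvParts_slash]
  | c :: t =>
    by_cases hc : c = '/'
    · subst hc
      rw [show pvSq ('/' :: '/' :: t) = pvSq ('/' :: t) by rw [pvSq]; simp]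
      rw [pvK t, pvParts_slash]
    · -- first segment: maximal slash-free prefix of c :: t
      set p : Char → Bool := fun x => x != '/' with hp
      have hsf : ∀ x ∈ List.takeWhile p (c :: t), x ≠ '/' := by
        intro x hx
        have := List.mem_takeWhile_imp hx
        simpa [hp] using this
      have hsegc : List.takeWhile p (c :: t) = c :: List.takeWhile p t :=
        List.takeWhile_cons_of_pos (by simp [hp, hc])
      have hsegne : List.takeWhile p (c :: t) ≠ [] := by rw [hsegc]; simp
      have hsplit : List.takeWhile p (c :: t) ++ List.dropWhile p (c :: t) = c :: t :=
        List.takeWhile_append_dropWhile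
      cases hr : List.dropWhile p (c :: t) with
      | nil =>
        rw [hr, List.append_nil] at hsplit
        rw [← hsplit]
        rw [show pvSq ('/' :: List.takeWhile p (c :: t)) = '/' :: List.takeWhile p (c :: t) by
          have h1 := pv_sq_sf_append (List.takeWhile p (c :: t)) [] hsf
          simp only [List.append_nil] at h1
          rw [pvSq_cons, if_neg, h1, pvSq]
          · simp
          · rw [hsegc]; simp [hc]]
        rw [pv_rstrip_sf _ hsegne hsf]
        have hparts : pvParts (List.takeWhile p (c :: t)) = [List.takeWhile p (c :: t)] := by
          unfold pvParts
          rw [pv_split_sf _ hsf]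
          simp [hsegne]
        rw [hparts]
        simp [PySem.Chars.join, List.intercalate]
      | cons d r =>
        have hd : d = '/' := by
          have h1 := List.head?_dropWhile_not p (c :: t)
          rw [hr] at h1
          simp only [List.head?_cons] at h1
          simpa [hp] using h1
        subst hd
        rw [hr] at hsplit
        have hlen : r.length < (c :: t).length := by
          have hL := congrArg List.length hsplit
          simp at hL
          simp
          omega
        rw [← hsplit]
        have hsq : pvSq ('/' :: (List.takeWhile p (c :: t) ++ '/' :: r)) =
            ('/' :: List.takeWhile p (c :: t)) ++ pvSq ('/' :: r) := by
          rw [pvSq_cons, if_neg, pv_sq_sf_append _ ('/' :: r) hsf]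
          · simp
          · rw [hsegc]; simp [hc]
        rw [hsq, pv_rstrip_append]
        have hKr := pvK r
        have hparts : pvParts (List.takeWhile p (c :: t) ++ '/' :: r) =
            List.takeWhile p (c :: t) :: pvParts r := by
          unfold pvParts
          rw [pv_split_sf_append _ r hsf]
          simp [hsegne]
        rw [hparts]
        by_cases hpr : pvParts r = []
        · rw [if_pos (by rw [hKr, if_pos hpr])]
          rw [pv_rstrip_sf _ hsegne hsf]
          simp [hpr, PySem.Chars.join, List.intercalate]
        · have hKr' : pvRstripSlash (pvSq ('/' :: r)) = '/' :: PySem.Chars.join ['/'] (pvParts r) := by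
            rw [hKr, if_neg hpr]
          rw [if_neg (by rw [hKr']; simp)]
          rw [hKr']
          obtain ⟨q, ps, hq⟩ : ∃ q ps, pvParts r = q :: ps := by
            cases h0 : pvParts r with
            | nil => exact absurd h0 hpr
            | cons a b => exact ⟨a, b, rfl⟩
          rw [if_neg (by simp), hq]
          show _ ++ '/' :: PySem.Chars.join ['/'] (q :: ps) = '/' :: PySem.Chars.join ['/'] (_ :: q :: ps)
          unfold PySem.Chars.join
          rw [pv_intercalate_cons2]
          simp
termination_by l.length
decreasing_by
  all_goals first
  | assumption
  | simp

-- assembled list-level statement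
theorem pvMain (l : List Char) :
    (if pvRstripSlash (pvSq ('/' :: l)) = [] then ['/']
     else pvRstripSlash (pvSq ('/' :: l))) = '/' :: PySem.Chars.join ['/'] (pvParts l) := by
  rw [pvK l]
  by_cases h : pvParts l = []
  · simp [h, PySem.Chars.join, List.intercalate]
  · simp [h]

-- ===== VERDICT (by name: the statement is the Claim_ definition above) =====
theorem normalize_container_path_py_spec : Claim_equal_normalize_container_path_py := by
  intro path _
  unfold Spec_normalize_container_path_py normalize_container_path_py normalize_container_path_py_alt
  by_cases hempty : path.toList = []
  · simp [hempty]
  · simp only [hempty, if_false]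
    set n1 := PySem.Chars.replace path.toList ['\\'] ['/'] with hn1
    rw [pv_splitOn_eq]
    have hparts : (pvSplit n1).filter (fun p => decide (p ≠ [])) = pvParts n1 := rfl
    rw [hparts]
    by_cases hsw : PySem.Chars.startswith n1 ['/'] = true
    · obtain ⟨u, hu⟩ := (PySem.Chars.startswith_iff _ _).mp hsw
      rw [if_pos hsw, pvCollapseLoop_eq_sq]
      rw [show n1 = '/' :: u by rw [← hu]; rfl]
      rw [pvMain u, pvParts_slash]
    · rw [if_neg hsw, pvCollapseLoop_eq_sq, pvMain n1]
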